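-- pv_equiv track=rewrite | github.com/calabamatex/sdlc-assessor | sdlc_assessor/classifier/engine.py | _detect_language_packs
-- ===== SOURCE A (Python) =====
-- LANGUAGE_SUFFIXES: dict[str, str] = {
--     ".py": "python",
--     ".ts": "typescript_javascript",
--     ".tsx": "typescript_javascript",
--     ".js": "typescript_javascript",
--     ".jsx": "typescript_javascript",
--     ".mjs": "typescript_javascript",
--     ".cjs": "typescript_javascript",
--     ".go": "go",
--     ".rs": "rust",
--     ".java": "java",
--     ".cs": "csharp",
--     ".kt": "kotlin",
--     ".kts": "kotlin",
-- }
--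
-- def _detect_language_packs(language_counts: dict[str, int]) -> list[str]:
--     packs = ["common"]
--     pack_names = set()
--     for suffix, pack in LANGUAGE_SUFFIXES.items():
--         if language_counts.get(suffix, 0) > 0:
--             pack_names.add(pack)
--     # Only include packs that are actually implemented today.
--     if "python" in pack_names:
--         packs.append("python")
--     if "typescript_javascript" in pack_names:
--         packs.append("typescript_javascript")
--     return packs
-- ===== SOURCE B (Python) =====
-- def _detect_language_packs(language_counts: dict[str, int]) -> list[str]:
--     packs = ["common"]
--     if language_counts.get(".py", 0) > 0:
--         packs.append("python")
--     if any(language_counts.get(s, 0) > 0 for s in (".ts", ".tsx", ".js", ".jsx", ".mjs", ".cjs")):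
--         packs.append("typescript_javascript")
--     return packs
-- ===== Notes on version B (the rewrite author's own statement) =====
-- stated objective: simpler
-- what changed: Replaced the scan over all 13 LANGUAGE_SUFFIXES entries into an intermediate pack-name set with two direct presence checks (.py, and any of the six JS/TS suffixes), dropping the set and the unused go/rust/java/csharp/kotlin collection entirely.
import Mathlib
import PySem

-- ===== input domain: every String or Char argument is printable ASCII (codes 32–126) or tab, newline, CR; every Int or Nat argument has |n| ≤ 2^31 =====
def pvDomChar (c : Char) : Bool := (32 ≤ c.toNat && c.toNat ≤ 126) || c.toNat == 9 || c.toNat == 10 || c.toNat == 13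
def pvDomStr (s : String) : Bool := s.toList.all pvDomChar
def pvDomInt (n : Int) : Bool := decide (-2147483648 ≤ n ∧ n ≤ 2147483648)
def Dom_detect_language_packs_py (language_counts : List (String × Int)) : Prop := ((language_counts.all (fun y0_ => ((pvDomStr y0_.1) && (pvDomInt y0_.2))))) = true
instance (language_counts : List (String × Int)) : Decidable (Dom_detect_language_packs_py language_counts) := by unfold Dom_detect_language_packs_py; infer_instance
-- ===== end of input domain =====

-- B replaces A's scan of all 13 LANGUAGE_SUFFIXES into an intermediate pack-name set with two direct presence checks (objective: simpler).


-- ===== PORT A =====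
def pvSuffixPacks : List (String × String) :=
  [(".py", "python"), (".ts", "typescript_javascript"), (".tsx", "typescript_javascript"),
   (".js", "typescript_javascript"), (".jsx", "typescript_javascript"), (".mjs", "typescript_javascript"),
   (".cjs", "typescript_javascript"), (".go", "go"), (".rs", "rust"), (".java", "java"),
   (".cs", "csharp"), (".kt", "kotlin"), (".kts", "kotlin")]

-- literal transliteration of A: scan LANGUAGE_SUFFIXES into a set of pack names, then test membership
def detect_language_packs_py (language_counts : List (String × Int)) : List String :=
  let packs := ["common"]
  let pack_names : PySem.Set String :=
    pvSuffixPacks.foldl (fun s sp =>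
      if PySem.Dict.getD (PySem.Dict.mk language_counts) sp.1 0 > 0 then PySem.Set.add s sp.2 else s)
      PySem.Set.empty
  let packs := if PySem.Set.contains pack_names "python" then packs ++ ["python"] else packs
  let packs := if PySem.Set.contains pack_names "typescript_javascript" then packs ++ ["typescript_javascript"] else packs
  packs

-- ===== PORT B =====
-- transliteration of B: direct presence checks, no intermediate set
def detect_language_packs_py_alt (language_counts : List (String × Int)) : List String :=
  let packs := ["common"]
  let packs := if PySem.Dict.getD (PySem.Dict.mk language_counts) ".py" 0 > 0 then packs ++ ["python"] else packs
  let packs := if [".ts", ".tsx", ".js", ".jsx", ".mjs", ".cjs"].any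
      (fun s => PySem.Dict.getD (PySem.Dict.mk language_counts) s 0 > 0) then packs ++ ["typescript_javascript"] else packs
  packs

-- ===== PRECONDITION & SPEC =====
def Spec_detect_language_packs_py (language_counts : List (String × Int)) (out : List String) : Prop := out = detect_language_packs_py_alt language_counts
instance (language_counts : List (String × Int)) (out : List String) : Decidable (Spec_detect_language_packs_py language_counts out) := by unfold Spec_detect_language_packs_py; infer_instance

-- ===== CLAIM (what is proved, stated in full; the proofs are below) =====
def Claim_equal_detect_language_packs_py : Prop := ∀ (language_counts : List (String × Int)), Dom_detect_language_packs_py language_counts → Spec_detect_language_packs_py language_counts (detect_language_packs_py language_counts)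

-- ===== LEMMAS AND PROOFS =====

-- ===== VERDICT (by name: the statement is the Claim_ definition above) =====
theorem pv_mem_step (c : Prop) [Decidable c] (s : List String) (y x : String) :
    x ∈ (if c then PySem.Set.add s y else s) ↔ x ∈ s ∨ (c ∧ x = y) := by
  by_cases hc : c <;> simp [hc, PySem.Set.mem_add, or_comm, eq_comm]

set_option maxHeartbeats 2000000 in
theorem detect_language_packs_py_spec : Claim_equal_detect_language_packs_py := by
  intro lc _
  unfold Spec_detect_language_packs_py detect_language_packs_py detect_language_packs_py_alt pvSuffixPacks
  have hp : PySem.Set.contains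
      ([((".py":String), ("python":String)), (".ts", "typescript_javascript"), (".tsx", "typescript_javascript"),
        (".js", "typescript_javascript"), (".jsx", "typescript_javascript"), (".mjs", "typescript_javascript"),
        (".cjs", "typescript_javascript"), (".go", "go"), (".rs", "rust"), (".java", "java"),
        (".cs", "csharp"), (".kt", "kotlin"), (".kts", "kotlin")].foldl
        (fun s sp => if PySem.Dict.getD (PySem.Dict.mk lc) sp.1 0 > 0 then PySem.Set.add s sp.2 else s)
        PySem.Set.empty) "python" = true ↔
      PySem.Dict.getD (PySem.Dict.mk lc) ".py" 0 > 0 := by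
    simp only [List.foldl]
    simp [PySem.Set.contains, pv_mem_step, PySem.Set.empty]
    split_ifs <;> simp_all
  have hts : PySem.Set.contains
      ([((".py":String), ("python":String)), (".ts", "typescript_javascript"), (".tsx", "typescript_javascript"),
        (".js", "typescript_javascript"), (".jsx", "typescript_javascript"), (".mjs", "typescript_javascript"),
        (".cjs", "typescript_javascript"), (".go", "go"), (".rs", "rust"), (".java", "java"),
        (".cs", "csharp"), (".kt", "kotlin"), (".kts", "kotlin")].foldl
        (fun s sp => if PySem.Dict.getD (PySem.Dict.mk lc) sp.1 0 > 0 then PySem.Set.add s sp.2 else s)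
        PySem.Set.empty) "typescript_javascript" = true ↔
      (PySem.Dict.getD (PySem.Dict.mk lc) ".ts" 0 > 0 ∨ PySem.Dict.getD (PySem.Dict.mk lc) ".tsx" 0 > 0 ∨
       PySem.Dict.getD (PySem.Dict.mk lc) ".js" 0 > 0 ∨ PySem.Dict.getD (PySem.Dict.mk lc) ".jsx" 0 > 0 ∨
       PySem.Dict.getD (PySem.Dict.mk lc) ".mjs" 0 > 0 ∨ PySem.Dict.getD (PySem.Dict.mk lc) ".cjs" 0 > 0) := by
    clear hp
    simp only [List.foldl]
    simp [PySem.Set.contains, pv_mem_step, PySem.Set.empty]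
    split_ifs <;> simp_all <;> omega
  simp only [hp, hts, List.any, Bool.or_eq_true, decide_eq_true_eq, Bool.false_eq_true, or_false]
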